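-- pv_equiv track=rewrite | github.com/karelplanken/fcc-coding-challenges | challenges/172_letter_numbers.py | separate_letters_and_numbers
-- ===== SOURCE A (Python) =====
-- def separate_letters_and_numbers(s: str) -> str:
--     if not s:
--         return s
--
--     def get_separator(prev: str, curr: str) -> str:
--         is_transition = (prev.isdigit() and curr.isalpha()) or (
--             prev.isalpha() and curr.isdigit()
--         )
--         return '-' if is_transition else ''
--
--     return s[0] + ''.join(
--         get_separator(s[i - 1], s[i]) + s[i] for i in range(1, len(s))
--     )
-- ===== SOURCE B (Python) =====
-- def separate_letters_and_numbers(s: str) -> str: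
--     # Two-phase: group s into maximal class runs, then join runs with dashes
--     # exactly at letter<->digit run boundaries.
--     def key(c: str) -> str:
--         if c.isdigit():
--             return 'd'
--         if c.isalpha():
--             return 'a'
--         return 'o'
--
--     if not s:
--         return ''
--
--     # Phase 1: maximal runs as (class, run_text) pairs.
--     runs = []
--     cur_key, cur = key(s[0]), s[0]
--     for c in s[1:]:
--         k = key(c)
--         if k == cur_key:
--             cur += c
--         else:
--             runs.append((cur_key, cur))
--             cur_key, cur = k, c
--     runs.append((cur_key, cur))
--
--     # Phase 2: emit runs, dashing digit<->letter boundaries only.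
--     parts = []
--     prev = None
--     for k, text in runs:
--         if (prev == 'd' and k == 'a') or (prev == 'a' and k == 'd'):
--             parts.append('-')
--         parts.append(text)
--         prev = k
--     return ''.join(parts)
-- ===== Notes on version B (the rewrite author's own statement) =====
-- stated objective: alternative
-- what changed: A builds the result index-by-index, calling the separator helper on (s[i-1], s[i]) for every position; B first groups the string into maximal class runs (digit/alpha/other) in one pass and then joins the runs, emitting a dash only at digit<->letter run boundaries.
import Mathlib
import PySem

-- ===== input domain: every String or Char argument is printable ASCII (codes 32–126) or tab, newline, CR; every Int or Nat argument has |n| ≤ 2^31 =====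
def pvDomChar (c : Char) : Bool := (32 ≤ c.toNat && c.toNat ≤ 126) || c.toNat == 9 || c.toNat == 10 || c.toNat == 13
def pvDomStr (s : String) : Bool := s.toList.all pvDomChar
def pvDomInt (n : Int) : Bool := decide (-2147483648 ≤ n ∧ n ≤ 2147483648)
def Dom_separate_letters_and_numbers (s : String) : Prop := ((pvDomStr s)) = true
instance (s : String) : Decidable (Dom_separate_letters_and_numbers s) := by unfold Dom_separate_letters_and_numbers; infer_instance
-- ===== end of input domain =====

-- B re-implements A by a different decomposition: group into maximal class runs, then join
-- runs with a dash at digit<->letter run boundaries (alternative, same O(n) cost).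


-- ===== PORT A =====
-- A's inner helper get_separator; prev/curr are the one-character strings s[i-1], s[i],
-- modelled as Char (str.isdigit/isalpha on a one-char string = the char predicate).
def pvGetSeparator (prev curr : Char) : List Char :=
  if (PySem.Chars.isdigit prev && PySem.Chars.isalpha curr)
      || (PySem.Chars.isalpha prev && PySem.Chars.isdigit curr) then ['-'] else []

-- indices i-1, i produced by range(1, len(s)) are always in range, so the IndexError
-- default ' ' of .getD is never used
def separate_letters_and_numbers (s : String) : String :=
  if s = "" then s
  else
    let cs := s.toList
    let joined := (PySem.List.pyRange 1 (PySem.Str.len s)).foldl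
      (fun acc i =>
        acc ++ (pvGetSeparator ((PySem.List.pyGet? cs (i - 1)).getD ' ')
                  ((PySem.List.pyGet? cs i).getD ' ')
                ++ [(PySem.List.pyGet? cs i).getD ' '])) []
    String.mk (((PySem.List.pyGet? cs 0).getD ' ') :: joined)

-- ===== PORT B =====
-- class of a character: 'd' digit, 'a' letter, 'o' other
def pvKey (c : Char) : Char :=
  if PySem.Chars.isdigit c then 'd' else if PySem.Chars.isalpha c then 'a' else 'o'

-- phase 1 loop of Source B: state (runs, cur_key, cur), one step per character
def pvGroupGo (runs : List (Char × List Char)) (ck : Char) (cur : List Char) :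
    List Char → List (Char × List Char)
  | [] => runs ++ [(ck, cur)]
  | c :: rest =>
      if pvKey c = ck then pvGroupGo runs ck (cur ++ [c]) rest
      else pvGroupGo (runs ++ [(ck, cur)]) (pvKey c) [c] rest

-- phase 2 loop of Source B: state (parts, prev), one step per run
def pvEmit (parts : List Char) (prev : Option Char) :
    List (Char × List Char) → List Char
  | [] => parts
  | (k, t) :: rest =>
      pvEmit (parts ++ (if (prev == some 'd' && k == 'a')
                          || (prev == some 'a' && k == 'd') then ['-'] else []) ++ t)
        (some k) rest

def separate_letters_and_numbers_alt (s : String) : String :=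
  match s.toList with
  | [] => ""
  | c :: rest => String.mk (pvEmit [] none (pvGroupGo [] (pvKey c) [c] rest))

-- ===== PRECONDITION & SPEC =====
def Spec_separate_letters_and_numbers (s : String) (out : String) : Prop := out = separate_letters_and_numbers_alt s
instance (s : String) (out : String) : Decidable (Spec_separate_letters_and_numbers s out) := by unfold Spec_separate_letters_and_numbers; infer_instance

-- ===== CLAIM (what is proved, stated in full; the proofs are below) =====
def Claim_equal_separate_letters_and_numbers : Prop := ∀ (s : String), Dom_separate_letters_and_numbers s → Spec_separate_letters_and_numbers s (separate_letters_and_numbers s)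

-- ===== LEMMAS AND PROOFS =====

-- dash test on two class keys
def pvDashB (p k : Char) : Bool := (p == 'd' && k == 'a') || (p == 'a' && k == 'd')

-- the character-by-character result, driven by the class of the previous character
def pvChainK (p : Char) : List Char → List Char
  | [] => []
  | c :: r => (if pvDashB p (pvKey c) then ['-'] else []) ++ c :: pvChainK (pvKey c) r

-- A's character-by-character result
def pvChainA (p : Char) : List Char → List Char
  | [] => []
  | c :: r => pvGetSeparator p c ++ c :: pvChainA c r

lemma pv_digit_not_alpha (c : Char) (h : PySem.Chars.isdigit c = true) :
    PySem.Chars.isalpha c = false := by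
  have e1 : '0'.val.toNat = 48 := rfl
  have e2 : '9'.val.toNat = 57 := rfl
  have e3 : 'A'.val.toNat = 65 := rfl
  have e4 : 'Z'.val.toNat = 90 := rfl
  have e5 : 'a'.val.toNat = 97 := rfl
  have e6 : 'z'.val.toNat = 122 := rfl
  simp only [PySem.Chars.isdigit, PySem.Chars.isalpha, PySem.Chars.isupper, PySem.Chars.islower,
    Bool.and_eq_true, decide_eq_true_eq, Char.le_def, UInt32.le_iff_toNat_le,
    Bool.or_eq_false_iff, Bool.and_eq_false_iff, decide_eq_false_iff_not, not_le] at *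
  omega

lemma pvDashB_self (k : Char) : pvDashB k k = false := by
  by_cases h : k = 'd' <;> by_cases h' : k = 'a' <;> simp_all [pvDashB]

lemma pvSep_eq_dash (p c : Char) :
    pvGetSeparator p c = if pvDashB (pvKey p) (pvKey c) then ['-'] else [] := by
  by_cases hp : PySem.Chars.isdigit p = true <;>
    by_cases hc : PySem.Chars.isdigit c = true <;>
    by_cases hp' : PySem.Chars.isalpha p = true <;>
    by_cases hc' : PySem.Chars.isalpha c = true <;>
    simp_all [pvGetSeparator, pvKey, pvDashB, pv_digit_not_alpha]

lemma pvChainA_eq_chainK (l : List Char) (p : Char) :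
    pvChainA p l = pvChainK (pvKey p) l := by
  induction l generalizing p with
  | nil => rfl
  | cons c r ih => simp [pvChainA, pvChainK, pvSep_eq_dash, ih]

lemma pvGroupGo_append (l : List Char) (runs : List (Char × List Char))
    (ck : Char) (cur : List Char) :
    pvGroupGo runs ck cur l = runs ++ pvGroupGo [] ck cur l := by
  induction l generalizing runs ck cur with
  | nil => simp [pvGroupGo]
  | cons c rest ih =>
    by_cases h : pvKey c = ck
    · rw [pvGroupGo, pvGroupGo, if_pos h, if_pos h, ih]
    · rw [pvGroupGo, pvGroupGo, if_neg h, if_neg h,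
        ih (runs ++ [(ck, cur)]), ih ([] ++ [(ck, cur)])]
      simp

lemma pvEmit_append (rs : List (Char × List Char)) (parts : List Char)
    (prev : Option Char) :
    pvEmit parts prev rs = parts ++ pvEmit [] prev rs := by
  induction rs generalizing parts prev with
  | nil => simp [pvEmit]
  | cons r rest ih =>
    obtain ⟨k, t⟩ := r
    rw [pvEmit, pvEmit, ih, ih (([] : List Char) ++ _ ++ t)]
    simp

lemma pvEmit_groupGo_some (l : List Char) (k : Char) (cur : List Char) (p : Char) :
    pvEmit [] (some p) (pvGroupGo [] k cur l)
      = (if pvDashB p k then ['-'] else []) ++ cur ++ pvChainK k l := by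
  induction l generalizing k cur p with
  | nil => simp [pvGroupGo, pvEmit, pvChainK, pvDashB]
  | cons c rest ih =>
    by_cases h : pvKey c = k
    · rw [pvGroupGo, if_pos h, ih, pvChainK, h, pvDashB_self]
      simp
    · rw [pvGroupGo, if_neg h, pvGroupGo_append, pvChainK]
      simp only [List.nil_append, List.singleton_append]
      rw [pvEmit, pvEmit_append, ih]
      simp [pvDashB]

lemma pvEmit_groupGo_none (l : List Char) (k : Char) (cur : List Char) :
    pvEmit [] none (pvGroupGo [] k cur l) = cur ++ pvChainK k l := by
  induction l generalizing k cur with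
  | nil => simp [pvGroupGo, pvEmit, pvChainK]
  | cons c rest ih =>
    by_cases h : pvKey c = k
    · rw [pvGroupGo, if_pos h, ih, pvChainK, h, pvDashB_self]
      simp
    · rw [pvGroupGo, if_neg h, pvGroupGo_append, pvChainK]
      simp only [List.nil_append, List.singleton_append]
      rw [pvEmit, pvEmit_append, pvEmit_groupGo_some]
      simp [pvDashB]

-- A's flatMap over range(1, len) equals the chain, stated with an offset prefix
lemma pvFlat_chain (t : List Char) : ∀ (pre : List Char) (p : Char),
    ((PySem.List.pyRange ((pre.length : Int) + 1) ((pre.length : Int) + 1 + t.length)).flatMap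
      (fun i =>
        pvGetSeparator ((PySem.List.pyGet? (pre ++ p :: t) (i - 1)).getD ' ')
            ((PySem.List.pyGet? (pre ++ p :: t) i).getD ' ')
          ++ [(PySem.List.pyGet? (pre ++ p :: t) i).getD ' '])) = pvChainA p t := by
  induction t with
  | nil =>
    intro pre p
    simp [PySem.List.pyRange, pvChainA]
  | cons c t' ih =>
    intro pre p
    have hlt : ((pre.length : Int) + 1) < ((pre.length : Int) + 1 + ((c :: t').length : Int)) := by
      simp only [List.length_cons]; push_cast; omega
    rw [PySem.List.pyRange_one_cons hlt, List.flatMap_cons]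
    have h1 : PySem.List.pyGet? (pre ++ p :: c :: t') ((pre.length : Int) + 1 - 1) = some p := by
      have e : ((pre.length : Int) + 1 - 1) = ((pre.length : Nat) : Int) := by ring
      rw [e, PySem.List.pyGet?_natCast, List.getElem?_append_right (le_refl _)]
      simp
    have h2 : PySem.List.pyGet? (pre ++ p :: c :: t') ((pre.length : Int) + 1) = some c := by
      have e : ((pre.length : Int) + 1) = ((pre.length + 1 : Nat) : Int) := by push_cast; ring
      rw [e, PySem.List.pyGet?_natCast, List.getElem?_append_right (by omega)]
      simp
    have h3 := ih (pre ++ [p]) c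
    simp only [List.append_assoc, List.singleton_append, List.length_append,
      List.length_cons, List.length_nil] at h3
    push_cast at h3
    have hstop : ((pre.length : Int) + 1 + ((c :: t').length : Int))
        = ((pre.length : Int) + 1 + 1 + (t'.length : Int)) := by
      simp only [List.length_cons]; push_cast; ring
    rw [hstop]
    rw [h1, h2, pvChainA, h3]
    simp

-- ===== VERDICT (by name: the statement is the Claim_ definition above) =====
theorem separate_letters_and_numbers_spec : Claim_equal_separate_letters_and_numbers := by
  intro s _
  unfold Spec_separate_letters_and_numbers
  cases h : s.toList with
  | nil =>
    have hs : s = "" := by cases s; simp_all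
    subst hs
    rfl
  | cons c r =>
    have hne : s ≠ "" := by intro e; rw [e] at h; simp at h
    simp only [separate_letters_and_numbers_alt, separate_letters_and_numbers, if_neg hne, h]
    rw [pvEmit_groupGo_none, PySem.List.foldl_append_eq_flatMap]
    have hlen : PySem.Str.len s = 1 + (r.length : Int) := by
      rw [PySem.Str.len_eq, h]; simp only [List.length_cons]; push_cast; omega
    rw [hlen]
    have hf := pvFlat_chain r [] c
    simp only [List.length_nil, Nat.cast_zero, zero_add, List.nil_append] at hf
    rw [hf, pvChainA_eq_chainK]
    simp [PySem.List.pyGet?, PySem.List.pyIdx?]
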